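-- pv_equiv track=rewrite | github.com/leoalfarotk/perfect-melody | midi_extraction.py | generate_melody
-- ===== SOURCE A (Python) =====
-- def generate_melody(average_data, total_bars):
--     melody_route = {}
--
--     # For each instant of time, get
--     # the bar with the highest pitch
--     for i in range(0, total_bars):
--         selected_channel = (-1, -1)
--
--         for index, channel in enumerate(average_data):
--             if i in channel.keys():
--                 bar_avg_pitch = channel[i][0]
--
--                 if bar_avg_pitch > selected_channel[1]:
--                     selected_channel = (index, bar_avg_pitch)
--
--         melody_route[i] = selected_channel[0]
--
--     return melody_route
-- ===== SOURCE B (Python) =====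
-- def generate_melody(average_data, total_bars):
--     best = {i: (-1, -1) for i in range(total_bars)}
--
--     # One pass over the entries that actually exist: each channel entry
--     # updates the per-bar running best (strict >, so the first channel
--     # reaching a pitch wins ties, as in A's channel-order scan).
--     for index, channel in enumerate(average_data):
--         for i, bar in channel.items():
--             if 0 <= i < total_bars:
--                 pitch = bar[0]
--                 if pitch > best[i][1]:
--                     best[i] = (index, pitch)
--
--     return {i: sel[0] for i, sel in best.items()}
-- ===== Notes on version B (the rewrite author's own statement) =====
-- stated objective: faster
-- what changed: Loops inverted: instead of scanning every channel's dict for every bar index (total_bars * channels lookups), B initialises a default best-per-bar table once and makes a single pass over the entries each channel actually contains, updating the running best with strict >.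
import Mathlib
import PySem

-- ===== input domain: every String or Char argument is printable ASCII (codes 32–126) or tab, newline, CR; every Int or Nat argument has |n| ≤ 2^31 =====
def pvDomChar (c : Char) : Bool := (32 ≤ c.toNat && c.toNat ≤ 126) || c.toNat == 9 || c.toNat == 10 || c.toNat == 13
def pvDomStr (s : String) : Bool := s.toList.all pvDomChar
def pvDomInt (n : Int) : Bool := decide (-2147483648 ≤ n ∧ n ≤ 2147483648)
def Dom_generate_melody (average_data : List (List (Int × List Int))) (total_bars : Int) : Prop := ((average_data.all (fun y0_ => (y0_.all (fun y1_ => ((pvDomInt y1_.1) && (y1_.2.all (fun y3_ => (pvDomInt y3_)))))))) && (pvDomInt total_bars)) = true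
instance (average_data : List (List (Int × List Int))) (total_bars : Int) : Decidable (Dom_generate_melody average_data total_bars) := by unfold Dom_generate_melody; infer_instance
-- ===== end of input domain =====

-- B inverts A's loops: one pass over the entries each channel actually has, updating a
-- best-per-bar table initialised to (-1, -1), instead of scanning every channel per bar.

-- ===== PORT A =====
def generate_melody (average_data : List (List (Int × List Int))) (total_bars : Int) : List (Int × Int) :=
  ((PySem.List.pyRange 0 total_bars 1).foldl (fun melody_route i =>
      let selected_channel : Int × Int :=
        (PySem.List.enumerate average_data).foldl (fun sel p =>
          match (PySem.Dict.mk p.2).get? i with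
          | some bar =>
            match PySem.List.pyGet? bar 0 with
            | some bar_avg_pitch =>
              if bar_avg_pitch > sel.2 then (p.1, bar_avg_pitch) else sel
            | none => sel  -- Python raises IndexError here (empty tuple); excluded by Pre_
          | none => sel) (-1, -1)
      melody_route.insert i selected_channel.1)
    PySem.Dict.empty).items

-- ===== PORT B =====
def generate_melody_alt (average_data : List (List (Int × List Int))) (total_bars : Int) : List (Int × Int) :=
  let best0 : PySem.Dict Int (Int × Int) :=
    (PySem.List.pyRange 0 total_bars 1).foldl (fun d i => d.insert i (-1, -1)) PySem.Dict.empty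
  let best : PySem.Dict Int (Int × Int) :=
    (PySem.List.enumerate average_data).foldl (fun d p =>
      p.2.foldl (fun d (kv : Int × List Int) =>
        if 0 ≤ kv.1 ∧ kv.1 < total_bars then
          let pitch : Int :=
            match PySem.List.pyGet? kv.2 0 with
            | some x => x
            | none => 0  -- Python raises IndexError here (empty tuple); excluded by Pre_
          if pitch > (d.getD kv.1 (-1, -1)).2 then d.insert kv.1 (p.1, pitch) else d
        else d) d) best0
  best.items.map (fun q => (q.1, q.2.1))

-- ===== PRECONDITION & SPEC =====
-- Pre_ excludes (a) channels that map a bar index in [0, total_bars) to an EMPTY list — there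
-- both Pythons raise IndexError on bar[0] — and (b) association lists with duplicate keys inside
-- one channel, which do not represent any Python dict (a dict's keys are unique).
def Pre_generate_melody (average_data : List (List (Int × List Int))) (total_bars : Int) : Prop :=
  ∀ ch ∈ average_data, (ch.map Prod.fst).Nodup ∧
    ∀ kv ∈ ch, 0 ≤ kv.1 → kv.1 < total_bars → kv.2 ≠ []
instance (average_data : List (List (Int × List Int))) (total_bars : Int) : Decidable (Pre_generate_melody average_data total_bars) := by unfold Pre_generate_melody; infer_instance

def pvWitness_generate_melody : (List (List (Int × List Int))) × Int :=
  ([[(0, [60]), (1, [50])], [(1, [70]), (3, [])]], 2)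

def Spec_generate_melody (average_data : List (List (Int × List Int))) (total_bars : Int) (out : List (Int × Int)) : Prop := out = generate_melody_alt average_data total_bars
instance (average_data : List (List (Int × List Int))) (total_bars : Int) (out : List (Int × Int)) : Decidable (Spec_generate_melody average_data total_bars out) := by unfold Spec_generate_melody; infer_instance

-- ===== CLAIM (what is proved, stated in full; the proofs are below) =====
def Claim_equal_generate_melody : Prop := ∀ (average_data : List (List (Int × List Int))) (total_bars : Int), Dom_generate_melody average_data total_bars → Pre_generate_melody average_data total_bars → Spec_generate_melody average_data total_bars (generate_melody average_data total_bars)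

-- ===== LEMMAS AND PROOFS =====

-- bar[0] with the port's out-of-Pre_ default
def pvPitch (l : List Int) : Int :=
  match PySem.List.pyGet? l 0 with
  | some x => x
  | none => 0

-- A's inner scan over the channels, for one bar index i
def pvSelA (average_data : List (List (Int × List Int))) (i : Int) : Int × Int :=
  (PySem.List.enumerate average_data).foldl (fun sel p =>
    match (PySem.Dict.mk p.2).get? i with
    | some bar =>
      match PySem.List.pyGet? bar 0 with
      | some bar_avg_pitch =>
        if bar_avg_pitch > sel.2 then (p.1, bar_avg_pitch) else sel
      | none => sel
    | none => sel) (-1, -1)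

lemma pvA_unfold (ad : List (List (Int × List Int))) (tb : Int) :
    generate_melody ad tb =
      ((PySem.List.pyRange 0 tb 1).foldl
        (fun d i => d.insert i (pvSelA ad i).1) PySem.Dict.empty).items := rfl

-- B's dict-level entry step, and its value-level shadow at one key i
def pvDStep (tb idx : Int) (d : PySem.Dict Int (Int × Int)) (kv : Int × List Int) :
    PySem.Dict Int (Int × Int) :=
  if 0 ≤ kv.1 ∧ kv.1 < tb then
    if pvPitch kv.2 > (d.getD kv.1 (-1, -1)).2 then d.insert kv.1 (idx, pvPitch kv.2) else d
  else d

def pvInit (tb : Int) : PySem.Dict Int (Int × Int) :=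
  (PySem.List.pyRange 0 tb 1).foldl (fun d i => d.insert i (-1, -1)) PySem.Dict.empty

def pvProc (ad : List (List (Int × List Int))) (tb : Int)
    (d : PySem.Dict Int (Int × Int)) : PySem.Dict Int (Int × Int) :=
  (PySem.List.enumerate ad).foldl (fun d p => p.2.foldl (pvDStep tb p.1) d) d

lemma pvB_unfold (ad : List (List (Int × List Int))) (tb : Int) :
    generate_melody_alt ad tb = (pvProc ad tb (pvInit tb)).items.map (fun q => (q.1, q.2.1)) := rfl

def pvVStep (tb idx i : Int) (v : Int × Int) (kv : Int × List Int) : Int × Int :=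
  if kv.1 = i ∧ 0 ≤ kv.1 ∧ kv.1 < tb then
    if pvPitch kv.2 > v.2 then (idx, pvPitch kv.2) else v
  else v

lemma pvEntry_getD (tb idx i : Int) (d : PySem.Dict Int (Int × Int)) (kv : Int × List Int) :
    (pvDStep tb idx d kv).getD i (-1, -1) = pvVStep tb idx i (d.getD i (-1, -1)) kv := by
  unfold pvDStep pvVStep
  by_cases hr : 0 ≤ kv.1 ∧ kv.1 < tb
  · by_cases hk : kv.1 = i
    · subst hk
      by_cases hgt : pvPitch kv.2 > (d.getD kv.1 (-1, -1)).2
      · simp [hr, hgt]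
      · simp [hr, hgt]
    · by_cases hgt : pvPitch kv.2 > (d.getD kv.1 (-1, -1)).2
      · have hik : i ≠ kv.1 := Ne.symm hk
        simp [hr, hk, hgt, PySem.Dict.getD_insert, hik]
      · simp [hr, hk, hgt]
  · simp [hr]

lemma pvEntry_keys (tb idx : Int) (d : PySem.Dict Int (Int × Int)) (kv : Int × List Int)
    (hkeys : d.keys = PySem.List.pyRange 0 tb 1) :
    (pvDStep tb idx d kv).keys = d.keys := by
  unfold pvDStep
  by_cases hr : 0 ≤ kv.1 ∧ kv.1 < tb
  · by_cases hgt : pvPitch kv.2 > (d.getD kv.1 (-1, -1)).2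
    · have hc : d.contains kv.1 = true := by
        rw [PySem.Dict.contains_iff_mem_keys, hkeys, PySem.List.mem_pyRange_one]
        omega
      rw [if_pos hr, if_pos hgt]
      exact PySem.Dict.keys_insert_of_contains d _ hc
    · simp [hr, hgt]
  · simp [hr]

lemma pvChan_getD (tb idx i : Int) (es : List (Int × List Int)) :
    ∀ d : PySem.Dict Int (Int × Int),
      (es.foldl (pvDStep tb idx) d).getD i (-1, -1) =
        es.foldl (pvVStep tb idx i) (d.getD i (-1, -1)) := by
  induction es with
  | nil => intro d; rfl
  | cons kv es ih =>
    intro d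
    rw [List.foldl_cons, List.foldl_cons, ih, pvEntry_getD]

lemma pvChan_keys (tb idx : Int) (es : List (Int × List Int)) :
    ∀ d : PySem.Dict Int (Int × Int), d.keys = PySem.List.pyRange 0 tb 1 →
      (es.foldl (pvDStep tb idx) d).keys = PySem.List.pyRange 0 tb 1 := by
  induction es with
  | nil => intro d h; exact h
  | cons kv es ih =>
    intro d h
    rw [List.foldl_cons]
    exact ih _ (by rw [pvEntry_keys tb idx d kv h, h])

lemma pvProc_getD (tb i : Int) (E : List (Int × List (Int × List Int))) :
    ∀ d : PySem.Dict Int (Int × Int),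
      (E.foldl (fun d p => p.2.foldl (pvDStep tb p.1) d) d).getD i (-1, -1) =
        E.foldl (fun v p => p.2.foldl (pvVStep tb p.1 i) v) (d.getD i (-1, -1)) := by
  induction E with
  | nil => intro d; rfl
  | cons p E ih =>
    intro d
    rw [List.foldl_cons, List.foldl_cons, ih, pvChan_getD]

lemma pvProc_keys (tb : Int) (E : List (Int × List (Int × List Int))) :
    ∀ d : PySem.Dict Int (Int × Int), d.keys = PySem.List.pyRange 0 tb 1 →
      (E.foldl (fun d p => p.2.foldl (pvDStep tb p.1) d) d).keys = PySem.List.pyRange 0 tb 1 := by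
  induction E with
  | nil => intro d h; exact h
  | cons p E ih =>
    intro d h
    rw [List.foldl_cons]
    exact ih _ (pvChan_keys tb p.1 p.2 d h)

lemma pvSkip (tb idx i : Int) (es : List (Int × List Int)) (hni : i ∉ es.map Prod.fst) :
    ∀ v : Int × Int, es.foldl (pvVStep tb idx i) v = v := by
  induction es with
  | nil => intro v; rfl
  | cons kv es ih =>
    intro v
    simp only [List.map_cons, List.mem_cons, not_or] at hni
    rw [List.foldl_cons]
    have h1 : pvVStep tb idx i v kv = v := by
      unfold pvVStep
      rw [if_neg]
      rintro ⟨h, -⟩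
      exact hni.1 h.symm
    rw [h1, ih hni.2]

lemma pvChan_sel (tb idx i : Int) (hi : 0 ≤ i ∧ i < tb) (es : List (Int × List Int))
    (hnd : (es.map Prod.fst).Nodup)
    (hne : ∀ kv ∈ es, 0 ≤ kv.1 → kv.1 < tb → kv.2 ≠ []) :
    ∀ v : Int × Int,
      es.foldl (pvVStep tb idx i) v =
        (match (PySem.Dict.mk es).get? i with
         | some bar =>
           match PySem.List.pyGet? bar 0 with
           | some bp => if bp > v.2 then (idx, bp) else v
           | none => v
         | none => v) := by
  induction es with
  | nil => intro v; simp [PySem.Dict.get?]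
  | cons kv es ih =>
    obtain ⟨k, bar⟩ := kv
    intro v
    simp only [List.map_cons, List.nodup_cons] at hnd
    rw [List.foldl_cons, PySem.Dict.get?_mk_cons]
    by_cases hk : k = i
    · subst hk
      have hbar : bar ≠ [] := hne (k, bar) (List.mem_cons_self) hi.1 hi.2
      cases bar with
      | nil => exact absurd rfl hbar
      | cons b0 bs =>
      have hv : pvVStep tb idx k v (k, b0 :: bs) =
          (if b0 > v.2 then (idx, b0) else v) := by
        unfold pvVStep pvPitch
        simp [hi.1, hi.2]
      rw [hv, pvSkip tb idx k es hnd.1]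
      simp
    · have hv : pvVStep tb idx i v (k, bar) = v := by
        unfold pvVStep
        simp [hk]
      rw [hv]
      have := ih hnd.2 (fun kv h h1 h2 => hne kv (List.mem_cons_of_mem _ h) h1 h2) v
      rw [this]
      simp [hk]

lemma pvSel_eq (ad : List (List (Int × List Int))) (tb i : Int) (hi : 0 ≤ i ∧ i < tb)
    (hpre : Pre_generate_melody ad tb) :
    (PySem.List.enumerate ad).foldl (fun v p => p.2.foldl (pvVStep tb p.1 i) v) (-1, -1) =
      pvSelA ad i := by
  unfold pvSelA
  apply PySem.List.foldl_congr_mem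
  intro acc p hp
  have h2 : p.2 ∈ ad := by
    rcases (PySem.List.mem_enumerate_iff ad 0 p).1 hp with ⟨k, hk, hpk⟩
    rw [hpk]
    exact List.getElem_mem hk
  obtain ⟨hnd, hne⟩ := hpre p.2 h2
  exact pvChan_sel tb p.1 i hi p.2 hnd hne acc

lemma pvInit_items (tb : Int) :
    (pvInit tb).items = (PySem.List.pyRange 0 tb 1).map (fun i => (i, ((-1 : Int), (-1 : Int)))) := by
  unfold pvInit
  rw [PySem.Dict.items_foldl_insert_fresh (k := fun i => i) (v := fun _ => ((-1 : Int), (-1 : Int)))]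
  · simp [PySem.Dict.empty]
  · intro a _
    simp
  · simpa using PySem.List.nodup_pyRange_one 0 tb

lemma pvInit_keys (tb : Int) : (pvInit tb).keys = PySem.List.pyRange 0 tb 1 := by
  simp only [PySem.Dict.keys, pvInit_items, List.map_map]
  exact List.map_congr_left (fun x _ => rfl) |>.trans (List.map_id _)

lemma pvInit_getD (tb i : Int) (hi : 0 ≤ i ∧ i < tb) :
    (pvInit tb).getD i (-1, -1) = (-1, -1) := by
  apply PySem.Dict.getD_of_mem_items
  · rw [pvInit_items]
    exact List.mem_map.2 ⟨i, (PySem.List.mem_pyRange_one).2 hi, rfl⟩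
  · rw [pvInit_keys]
    exact PySem.List.nodup_pyRange_one 0 tb

lemma pvA_form (ad : List (List (Int × List Int))) (tb : Int) :
    generate_melody ad tb = (PySem.List.pyRange 0 tb 1).map (fun i => (i, (pvSelA ad i).1)) := by
  rw [pvA_unfold, PySem.Dict.items_foldl_insert_fresh (k := fun i => i) (v := fun i => (pvSelA ad i).1)]
  · simp [PySem.Dict.empty]
  · intro a _
    simp
  · simpa using PySem.List.nodup_pyRange_one 0 tb

-- ===== VERDICT (by name: the statement is the Claim_ definition above) =====
theorem generate_melody_spec : Claim_equal_generate_melody := by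
  intro ad tb _ hpre
  unfold Spec_generate_melody
  have hkeys : (pvProc ad tb (pvInit tb)).keys = PySem.List.pyRange 0 tb 1 :=
    pvProc_keys tb (PySem.List.enumerate ad) (pvInit tb) (pvInit_keys tb)
  have hnd : (pvProc ad tb (pvInit tb)).keys.Nodup := by
    rw [hkeys]; exact PySem.List.nodup_pyRange_one 0 tb
  rw [pvA_form, pvB_unfold,
      PySem.Dict.items_eq_map_keys _ hnd ((-1 : Int), (-1 : Int)), hkeys, List.map_map]
  apply List.map_congr_left
  intro i hi
  have hi' := (PySem.List.mem_pyRange_one).1 hi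
  have hget : (pvProc ad tb (pvInit tb)).getD i (-1, -1) = pvSelA ad i := by
    unfold pvProc
    rw [pvProc_getD, pvInit_getD tb i hi', pvSel_eq ad tb i hi' hpre]
  simp [Function.comp, hget]
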